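-- pv_equiv track=rewrite | github.com/F2-Song/PromptSLU | data.py | if_existed
-- ===== SOURCE A (Python) =====
-- import string
--
-- def if_existed(prior_list,t):
--     repeated_slots_num = 0
--     for key,value in prior_list:
--         if key.strip(string.digits) == t[0]:
--             if value == t[1]:
--                 return True, -1
--             else:
--                 repeated_slots_num += 1
--     return False, repeated_slots_num
-- ===== SOURCE B (Python) =====
-- import string
--
-- def if_existed(prior_list, t):
--     index = {}
--     for key, value in prior_list:
--         index.setdefault(key.strip(string.digits), []).append(value)
--     vals = index.get(t[0], [])
--     return (True, -1) if t[1] in vals else (False, len(vals))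
-- ===== Notes on version B (the rewrite author's own statement) =====
-- stated objective: alternative
-- what changed: Replaces A's early-return scan with a running counter by building a grouping dict index (stripped key -> list of values) once and answering from a single lookup: membership gives the True case, the group's length the False case.
import Mathlib
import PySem

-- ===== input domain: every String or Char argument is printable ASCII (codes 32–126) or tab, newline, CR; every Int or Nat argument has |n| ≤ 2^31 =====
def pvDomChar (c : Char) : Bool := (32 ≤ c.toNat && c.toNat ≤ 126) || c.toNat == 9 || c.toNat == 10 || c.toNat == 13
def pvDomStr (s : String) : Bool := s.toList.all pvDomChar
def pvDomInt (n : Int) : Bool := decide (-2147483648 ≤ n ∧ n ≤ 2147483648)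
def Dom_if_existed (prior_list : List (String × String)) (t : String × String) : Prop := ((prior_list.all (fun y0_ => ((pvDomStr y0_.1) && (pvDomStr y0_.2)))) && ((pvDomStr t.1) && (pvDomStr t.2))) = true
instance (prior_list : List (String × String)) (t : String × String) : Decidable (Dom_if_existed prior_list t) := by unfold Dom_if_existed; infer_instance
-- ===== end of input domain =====

-- B replaces A's early-return counting scan by a grouping dict index (stripped key -> values) built once, then a single lookup (objective: alternative).

-- ===== PORT A =====
-- A's loop: early return on value match, else count key matches.
def ifExistedGo (t : String × String) : List (String × String) → Int → Bool × Int
  | [], n => (false, n)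
  | (key, value) :: rest, n =>
    if PySem.Str.stripChars key "0123456789" == t.1 then
      if value == t.2 then (true, -1)
      else ifExistedGo t rest (n + 1)
    else ifExistedGo t rest n

def if_existed (prior_list : List (String × String)) (t : String × String) : Bool × Int :=
  ifExistedGo t prior_list 0

-- ===== PORT B =====
-- index.setdefault(sk, []).append(v)  =  modify sk [] (· ++ [v])
def if_existed_alt (prior_list : List (String × String)) (t : String × String) : Bool × Int :=
  let index := prior_list.foldl
    (fun d p => PySem.Dict.modify d (PySem.Str.stripChars p.1 "0123456789") [] (· ++ [p.2]))
    (PySem.Dict.empty : PySem.Dict String (List String))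
  let vals := PySem.Dict.getD index t.1 []
  if vals.contains t.2 then (true, -1) else (false, (vals.length : Int))

-- ===== PRECONDITION & SPEC =====
def Spec_if_existed (prior_list : List (String × String)) (t : String × String) (out : Bool × Int) : Prop := out = if_existed_alt prior_list t
instance (prior_list : List (String × String)) (t : String × String) (out : Bool × Int) : Decidable (Spec_if_existed prior_list t out) := by unfold Spec_if_existed; infer_instance

-- ===== CLAIM =====
def Claim_equal_if_existed : Prop := ∀ (prior_list : List (String × String)) (t : String × String), Dom_if_existed prior_list t → Spec_if_existed prior_list t (if_existed prior_list t)

-- ===== LEMMAS AND PROOFS =====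
-- A's loop equals the "filter then membership/length" form.
lemma ifExistedGo_eq (t : String × String) (l : List (String × String)) (n : Int) :
    ifExistedGo t l n =
      (let vals := (l.filter (fun p => PySem.Str.stripChars p.1 "0123456789" == t.1)).map Prod.snd
       if vals.contains t.2 then (true, -1) else (false, n + (vals.length : Int))) := by
  induction l generalizing n with
  | nil => simp [ifExistedGo]
  | cons p rest ih =>
    obtain ⟨key, value⟩ := p
    by_cases hk : (PySem.Str.stripChars key "0123456789" == t.1) = true
    · by_cases hv : value = t.2
      · subst hv
        simp [ifExistedGo, hk]
      · have hv1 : (value == t.2) = false := by simpa using hv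
        have hv2 : (t.2 == value) = false := by
          simp only [beq_eq_false_iff_ne, ne_eq]
          exact fun h => hv h.symm
        simp only [ifExistedGo, hk, if_true, hv1, Bool.false_eq_true, if_false, ih]
        simp only [List.filter_cons, hk, if_true, List.map_cons, List.contains_cons, hv2, Bool.false_or, List.length_cons]
        split_ifs with h
        · rfl
        · simp only [Prod.mk.injEq, true_and]
          push_cast
          ring
    · have hk' : (PySem.Str.stripChars key "0123456789" == t.1) = false := by
        simpa using hk
      simp only [ifExistedGo, hk', Bool.false_eq_true, if_false, ih]
      simp only [List.filter_cons, hk', Bool.false_eq_true, if_false]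

-- B's dict group at t.1 is exactly that filtered value list.
lemma index_getD_eq (t : String × String) (l : List (String × String)) :
    PySem.Dict.getD
      (l.foldl (fun d p => PySem.Dict.modify d (PySem.Str.stripChars p.1 "0123456789") [] (· ++ [p.2]))
        (PySem.Dict.empty : PySem.Dict String (List String))) t.1 []
      = (l.filter (fun p => PySem.Str.stripChars p.1 "0123456789" == t.1)).map Prod.snd := by
  have hfold :
      l.foldl (fun d p => PySem.Dict.modify d (PySem.Str.stripChars p.1 "0123456789") [] (· ++ [p.2]))
        (PySem.Dict.empty : PySem.Dict String (List String))
      = (l.map (fun p => (PySem.Str.stripChars p.1 "0123456789", p.2))).foldl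
          (fun d p => PySem.Dict.modify d p.1 [] (· ++ [p.2])) PySem.Dict.empty := by
    rw [List.foldl_map]
  rw [hfold, PySem.Dict.getD_foldl_modify_append]
  simp [PySem.Dict.getD_empty, List.filter_map, Function.comp_def]

-- ===== VERDICT =====
theorem if_existed_spec : Claim_equal_if_existed := by
  intro prior_list t _
  show _ = _
  simp only [if_existed, if_existed_alt, ifExistedGo_eq, index_getD_eq]
  simp
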